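-- pv_equiv track=rewrite | github.com/Felix-LeeSM/Algorithm_study | 문제풀이/2024/052024 백준 Magic Cards 30858 G2.py | solution
-- ===== SOURCE A (Python) =====
-- from collections import defaultdict
--
-- def solution(N, K, M, F, cards, queries):
--     cards_str = [['N']*K for _ in range(N+1)]
--
--     for card_no, card in enumerate(cards):
--         for num in card:
--             cards_str[num][card_no] = 'Y'
--
--     memo = defaultdict(int)
--     for num in range(1, N+1):
--         s = ''.join([cards_str[num][i] for i in range(K)])
--
--         if s in memo:
--             memo[s] = 0
--         else:
--             memo[s] = num
--
--     ret = [memo[query] for query in queries]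
--     return ret
-- ===== SOURCE B (Python) =====
-- def solution(N, K, M, F, cards, queries):
--     def owner(sig):
--         if len(sig) != K or any(ch not in 'YN' for ch in sig):
--             return 0
--         cands = range(1, N + 1)
--         for i, ch in enumerate(sig):
--             members = set(cards[i]) if i < len(cards) else frozenset()
--             cands = [x for x in cands if (x in members) == (ch == 'Y')]
--         return cands[0] if len(cands) == 1 else 0
--     return [owner(q) for q in queries]
-- ===== Notes on version B (the rewrite author's own statement) =====
-- stated objective: alternative
-- what changed: B never builds A's (N+1)xK matrix or the signature->owner dict: it answers each query directly by filtering the candidate numbers 1..N against the query's per-position card-membership constraints and returns the sole survivor (else 0); Pre_ excludes negative K (A's range(K) silently acts as K=0) and inputs where a negative card number could influence an answer via A's accidental negative-index wraparound, plus the inputs where A raises IndexError.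
-- outside the precondition, e.g. on solution(2, 1, 0, 0, [[-1]], ['Y', 'N']): A returns [2, 1], B returns [0, 0]; on solution(1, -1, 0, 0, [], ['']): A returns [1], B returns [0]
import Mathlib
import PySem

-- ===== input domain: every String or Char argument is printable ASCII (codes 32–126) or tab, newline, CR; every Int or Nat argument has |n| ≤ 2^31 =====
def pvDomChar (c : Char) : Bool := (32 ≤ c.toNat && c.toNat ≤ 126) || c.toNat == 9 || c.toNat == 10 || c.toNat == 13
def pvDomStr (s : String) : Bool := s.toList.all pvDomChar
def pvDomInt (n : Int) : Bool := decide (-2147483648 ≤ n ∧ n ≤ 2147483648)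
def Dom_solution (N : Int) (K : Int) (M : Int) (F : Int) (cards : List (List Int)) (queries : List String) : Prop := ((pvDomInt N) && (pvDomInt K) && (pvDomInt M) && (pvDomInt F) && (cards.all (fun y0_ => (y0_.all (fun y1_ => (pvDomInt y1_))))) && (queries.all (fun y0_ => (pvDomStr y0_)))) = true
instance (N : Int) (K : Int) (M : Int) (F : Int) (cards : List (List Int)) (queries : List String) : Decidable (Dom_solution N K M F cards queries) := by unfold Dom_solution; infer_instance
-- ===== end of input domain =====

-- B answers each query directly by filtering the candidate numbers 1..N against the query's per-card membership constraints,
-- instead of materializing all N signatures into a dict (objective: alternative); equal return values on Pre_.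

-- ===== PORT A =====
-- cards_str[num][card_no] = 'Y' with Python index semantics; a failing index (IndexError in Python, excluded by Pre_) leaves the matrix unchanged.
def pvScatterA (m : List (List Char)) (num : Int) (col : Int) : List (List Char) :=
  PySem.List.pySetD m num (PySem.List.pySetD (PySem.List.pyGetD m num []) col 'Y')

def solution (N : Int) (K : Int) (M : Int) (F : Int) (cards : List (List Int)) (queries : List String) : List Int :=
  let cardsStr0 := List.replicate (N + 1).toNat (List.replicate K.toNat 'N')
  let cardsStr := (PySem.List.enumerate cards 0).foldl
      (fun m p => p.2.foldl (fun m num => pvScatterA m num p.1) m) cardsStr0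
  -- strings are kept as their List Char (''.join of single chars); memo is keyed by those lists
  let memo := (PySem.List.pyRange 1 (N + 1) 1).foldl
      (fun (memo : PySem.Dict (List Char) Int) num =>
        let s := (PySem.List.pyRange 0 K 1).map
          (fun i => PySem.List.pyGetD (PySem.List.pyGetD cardsStr num []) i 'N')
        if memo.contains s then memo.insert s 0 else memo.insert s num)
      PySem.Dict.empty
  queries.map (fun q => memo.getD q.toList 0)

-- ===== PORT B =====
-- owner(sig): reject a query of the wrong length or with a character outside 'YN', then filter the
-- candidates 1..N position by position; answer the sole survivor, else 0.
def pvOwner (N : Int) (K : Int) (cards : List (List Int)) (q : String) : Int :=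
  let sig := q.toList
  if (PySem.Str.len q != K) || sig.any (fun ch => !(ch == 'Y' || ch == 'N')) then 0
  else
    let cands := (PySem.List.enumerate sig 0).foldl
      (fun (cands : List Int) p =>
        let members : PySem.Set Int :=
          if p.1 < (cards.length : Int) then PySem.Set.ofList (PySem.List.pyGetD cards p.1 []) else []
        cands.filter (fun x => PySem.Set.contains members x == (p.2 == 'Y')))
      (PySem.List.pyRange 1 (N + 1) 1)
    if cands.length = 1 then cands.headD 0 else 0

def solution_alt (N : Int) (K : Int) (M : Int) (F : Int) (cards : List (List Int)) (queries : List String) : List Int :=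
  queries.map (fun q => pvOwner N K cards q)

-- ===== PRECONDITION & SPEC =====
-- Pre_ excludes (a) negative K, where A's range(K) silently behaves as K = 0 (an accident of building the matrix
-- rows with ['N']*K) while B treats K as the stated signature length; (b) inputs where a negative card number could
-- influence an answer: Python's negative indexing silently wraps such a number onto row N+1+num, an artefact of A's
-- matrix representation that B's membership test does not reproduce (a wrapped write is provably irrelevant when
-- N ≤ 0 or when no query has length K, so those inputs stay inside Pre_); and the inputs where A raises IndexError
-- (a card number outside [-(N+1), N], or a nonempty card beyond the first K).
def Pre_solution (N : Int) (K : Int) (M : Int) (F : Int) (cards : List (List Int)) (queries : List String) : Prop :=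
  (0 ≤ K ∧ (∀ card ∈ cards, ∀ num ∈ card, -(N + 1) ≤ num ∧ num ≤ N) ∧
   (∀ card ∈ cards.drop K.toNat, card = [])) ∧
  (N ≤ 0 ∨ (∀ card ∈ cards, ∀ num ∈ card, 0 ≤ num) ∨ (∀ q ∈ queries, PySem.Str.len q ≠ K))
instance (N : Int) (K : Int) (M : Int) (F : Int) (cards : List (List Int)) (queries : List String) : Decidable (Pre_solution N K M F cards queries) := by unfold Pre_solution; infer_instance

def pvWitness_solution : Int × Int × Int × Int × List (List Int) × List String :=
  (3, 2, 0, 0, [[1], [1, 2]], ["NY", "YY", "YN"])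

def Spec_solution (N : Int) (K : Int) (M : Int) (F : Int) (cards : List (List Int)) (queries : List String) (out : List Int) : Prop := out = solution_alt N K M F cards queries
instance (N : Int) (K : Int) (M : Int) (F : Int) (cards : List (List Int)) (queries : List String) (out : List Int) : Decidable (Spec_solution N K M F cards queries out) := by unfold Spec_solution; infer_instance

-- ===== CLAIM (what is proved, stated in full; the proofs are below) =====
def Claim_equal_solution : Prop := ∀ (N : Int) (K : Int) (M : Int) (F : Int) (cards : List (List Int)) (queries : List String), Dom_solution N K M F cards queries → Pre_solution N K M F cards queries → Spec_solution N K M F cards queries (solution N K M F cards queries)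

-- ===== LEMMAS AND PROOFS =====

-- proof-side matrix entry reader
def pvE (m : List (List Char)) (r j : Nat) : Char := (m.getD r []).getD j 'N'

-- A's memo update step, on (num, signature) pairs
def pvStepA (d : PySem.Dict (List Char) Int) (p : Int × List Char) : PySem.Dict (List Char) Int :=
  if d.contains p.2 then d.insert p.2 0 else d.insert p.2 p.1

-- final value of A's memo for key q
def pvSpecA (pairs : List (Int × List Char)) (q : List Char) : Int :=
  if (pairs.filter (fun p => p.2 == q)).length = 1
  then ((pairs.filter (fun p => p.2 == q)).headD (0, q)).1 else 0

-- the matrix A builds, and A's signature of num, as standalone terms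
def pvMat (N K : Int) (cards : List (List Int)) : List (List Char) :=
  List.foldl (fun m p => List.foldl (fun m num => pvScatterA m num p.1) m p.2)
    (List.replicate (N + 1).toNat (List.replicate K.toNat 'N')) (PySem.List.enumerate cards 0)

def pvSigA (N K : Int) (cards : List (List Int)) (num : Int) : List Char :=
  (PySem.List.pyRange 0 K 1).map
    (fun i => PySem.List.pyGetD (PySem.List.pyGetD (pvMat N K cards) num []) i 'N')

-- pure signature: position j of num's signature is 'Y' iff num is on card j
def pvSigP (K : Int) (cards : List (List Int)) (n : Int) : List Char :=
  (List.range K.toNat).map (fun j => if n ∈ cards.getD j [] then 'Y' else 'N')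

lemma pvScatterA_length (m : List (List Char)) (num col : Int) :
    (pvScatterA m num col).length = m.length := by
  unfold pvScatterA; exact PySem.List.length_pySetD _ _ _

lemma pvScatterA_rows (m : List (List Char)) (num col : Int) (W : Nat)
    (h0 : 0 ≤ num) (h1 : num < (m.length : Int))
    (hW : ∀ row ∈ m, row.length = W) :
    ∀ row ∈ pvScatterA m num col, row.length = W := by
  unfold pvScatterA
  rw [PySem.List.pySetD_of_nonneg _ _ h0]
  intro row hrow
  rcases List.mem_or_eq_of_mem_set hrow with h | h
  · exact hW _ h
  · subst h
    rw [PySem.List.length_pySetD]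
    exact hW _ (PySem.List.pyGetD_mem m [] (by constructor <;> omega))

lemma pvGetD_set {α : Type} (l : List α) (d : α) (n r : Nat) (v : α) (hn : n < l.length) :
    (l.set n v).getD r d = if r = n then v else l.getD r d := by
  rcases eq_or_ne r n with h | h
  · subst h; simp [List.getD_eq_getElem?_getD, hn]
  · simp [List.getD_eq_getElem?_getD, h, Ne.symm h]

lemma pvScatterA_entry (m : List (List Char)) (num col : Int) (r j : Nat)
    (h0 : 0 ≤ num) (h1 : num < (m.length : Int)) (hc0 : 0 ≤ col)
    (hc1 : col < ((m.getD num.toNat []).length : Int)) :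
    pvE (pvScatterA m num col) r j =
      if r = num.toNat ∧ j = col.toNat then 'Y' else pvE m r j := by
  have hnum : num.toNat < m.length := by omega
  have hcol : col.toNat < (m.getD num.toNat []).length := by omega
  have hget : PySem.List.pyGetD m num [] = m.getD num.toNat [] := by
    rw [PySem.List.pyGetD_eq_getElem m [] h0 h1, List.getD_eq_getElem m [] hnum]
  unfold pvScatterA pvE
  rw [hget, PySem.List.pySetD_of_nonneg _ _ hc0, PySem.List.pySetD_of_nonneg _ _ h0,
      pvGetD_set _ _ _ _ _ hnum]
  by_cases hr : r = num.toNat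
  · subst hr
    rw [if_pos rfl, pvGetD_set _ _ _ _ _ hcol]
    by_cases hj : j = col.toNat
    · rw [if_pos hj, if_pos ⟨rfl, hj⟩]
    · rw [if_neg hj, if_neg (by tauto)]
  · rw [if_neg hr, if_neg (by tauto)]

lemma pvCardFold (c : List Int) (col : Int) (W : Nat) :
    ∀ m : List (List Char),
    (∀ row ∈ m, row.length = W) →
    (∀ num ∈ c, 0 ≤ num ∧ num < (m.length : Int)) →
    (c ≠ [] → 0 ≤ col ∧ col < (W : Int)) →
    (c.foldl (fun m num => pvScatterA m num col) m).length = m.length ∧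
    (∀ row ∈ c.foldl (fun m num => pvScatterA m num col) m, row.length = W) ∧
    ∀ r j : Nat, pvE (c.foldl (fun m num => pvScatterA m num col) m) r j =
      if (∃ num ∈ c, num = (r : Int)) ∧ j = col.toNat then 'Y' else pvE m r j := by
  induction c with
  | nil => intro m hW _ _; refine ⟨rfl, hW, ?_⟩; intro r j; simp
  | cons hd tl ih =>
    intro m hW hnum hcol
    have hhd := hnum hd (by simp)
    have hcol' := hcol (by simp)
    have hrowlen : ((m.getD hd.toNat []).length : Int) = (W : Int) := by
      have : m.getD hd.toNat [] ∈ m := by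
        rw [List.getD_eq_getElem m [] (by omega)]
        exact List.getElem_mem _
      rw [hW _ this]
    have hW' : ∀ row ∈ pvScatterA m hd col, row.length = W :=
      pvScatterA_rows m hd col W hhd.1 hhd.2 hW
    have hlen' : (pvScatterA m hd col).length = m.length := pvScatterA_length m hd col
    have hnum' : ∀ num ∈ tl, 0 ≤ num ∧ num < ((pvScatterA m hd col).length : Int) := by
      intro num hmem; rw [hlen']; exact hnum num (by simp [hmem])
    have hcol'' : tl ≠ [] → 0 ≤ col ∧ col < (W : Int) := fun _ => hcol'
    obtain ⟨ihl, ihW, ihE⟩ := ih (pvScatterA m hd col) hW' hnum' hcol''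
    simp only [List.foldl_cons]
    refine ⟨by rw [ihl, hlen'], ihW, ?_⟩
    intro r j
    rw [ihE r j, pvScatterA_entry m hd col r j hhd.1 hhd.2 hcol'.1 (by omega)]
    by_cases h1 : (∃ num ∈ tl, num = (r : Int)) ∧ j = col.toNat
    · rw [if_pos h1, if_pos (by exact ⟨⟨h1.1.choose, by simp [h1.1.choose_spec.1], h1.1.choose_spec.2⟩, h1.2⟩)]
    · rw [if_neg h1]
      by_cases h2 : r = hd.toNat ∧ j = col.toNat
      · rw [if_pos h2, if_pos ⟨⟨hd, by simp, by omega⟩, h2.2⟩]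
      · rw [if_neg h2, if_neg ?_]
        rintro ⟨⟨num, hmem, hval⟩, hj⟩
        rcases List.mem_cons.mp hmem with h | h
        · subst h; exact h2 ⟨by omega, hj⟩
        · exact h1 ⟨⟨num, h, hval⟩, hj⟩

lemma pvOuterFold (cs : List (List Int)) :
    ∀ (t : Int) (m : List (List Char)) (W : Nat),
    (∀ row ∈ m, row.length = W) →
    (∀ card ∈ cs, ∀ num ∈ card, 0 ≤ num ∧ num < (m.length : Int)) →
    (∀ p ∈ PySem.List.enumerate cs t, p.2 ≠ [] → 0 ≤ p.1 ∧ p.1 < (W : Int)) →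
    ((PySem.List.enumerate cs t).foldl
        (fun m p => p.2.foldl (fun m num => pvScatterA m num p.1) m) m).length = m.length ∧
    (∀ row ∈ (PySem.List.enumerate cs t).foldl
        (fun m p => p.2.foldl (fun m num => pvScatterA m num p.1) m) m, row.length = W) ∧
    ∀ r j : Nat, pvE ((PySem.List.enumerate cs t).foldl
        (fun m p => p.2.foldl (fun m num => pvScatterA m num p.1) m) m) r j =
      if ∃ p ∈ PySem.List.enumerate cs t, (r : Int) ∈ p.2 ∧ j = p.1.toNat then 'Y'
      else pvE m r j := by
  induction cs with
  | nil =>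
    intro t m W hW _ _
    refine ⟨rfl, hW, ?_⟩
    intro r j; simp [PySem.List.enumerate_nil]
  | cons c cs ih =>
    intro t m W hW hnum hcol
    rw [PySem.List.enumerate_cons] at *
    simp only [List.foldl_cons]
    have hcolc : c ≠ [] → 0 ≤ t ∧ t < (W : Int) := fun h => hcol (t, c) (by simp) h
    obtain ⟨cl, cW, cE⟩ := pvCardFold c t W m hW (hnum c (by simp)) hcolc
    have hnum' : ∀ card ∈ cs, ∀ num ∈ card, 0 ≤ num ∧
        num < ((c.foldl (fun m num => pvScatterA m num t) m).length : Int) := by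
      intro card hc num hn; rw [cl]; exact hnum card (by simp [hc]) num hn
    have hcol' : ∀ p ∈ PySem.List.enumerate cs (t + 1), p.2 ≠ [] → 0 ≤ p.1 ∧ p.1 < (W : Int) := by
      intro p hp hne; exact hcol p (by simp [hp]) hne
    obtain ⟨il, iW, iE⟩ := ih (t + 1) (c.foldl (fun m num => pvScatterA m num t) m) W cW hnum' hcol'
    refine ⟨by rw [il, cl], iW, ?_⟩
    intro r j
    rw [iE r j, cE r j]
    by_cases h1 : ∃ p ∈ PySem.List.enumerate cs (t + 1), (r : Int) ∈ p.2 ∧ j = p.1.toNat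
    · rw [if_pos h1, if_pos ?_]
      obtain ⟨p, hp, hm⟩ := h1; exact ⟨p, by simp [hp], hm⟩
    · rw [if_neg h1]
      by_cases h2 : (∃ num ∈ c, num = (r : Int)) ∧ j = t.toNat
      · rw [if_pos h2, if_pos ?_]
        obtain ⟨⟨num, hn, he⟩, hj⟩ := h2
        exact ⟨(t, c), by simp, by simpa [he] using hn, hj⟩
      · rw [if_neg h2, if_neg ?_]
        rintro ⟨p, hp, hm, hj⟩
        rcases List.mem_cons.mp hp with h | h
        · subst h; exact h2 ⟨⟨(r : Int), hm, rfl⟩, hj⟩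
        · exact h1 ⟨p, h, hm, hj⟩

lemma pvStepA_eq (d : PySem.Dict (List Char) Int) (p : Int × List Char) :
    pvStepA d p = d.insert p.2 (if d.contains p.2 then (0 : Int) else p.1) := by
  unfold pvStepA
  by_cases h : d.contains p.2 = true <;> simp [h]

-- the left-fold that builds A's memo equals pvSpecA, for every key
lemma pvMemoA (q : List Char) (pairs : List (Int × List Char)) :
    ((pairs.foldl pvStepA PySem.Dict.empty).getD q 0 = pvSpecA pairs q) ∧
    ((pairs.foldl pvStepA PySem.Dict.empty).contains q = pairs.any (fun p => p.2 == q)) := by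
  induction pairs using List.reverseRecOn with
  | nil => simp [pvSpecA]
  | append_singleton xs p ih =>
    obtain ⟨ihD, ihC⟩ := ih
    rw [List.foldl_append]
    simp only [List.foldl_cons, List.foldl_nil]
    rw [pvStepA_eq]
    constructor
    · rw [PySem.Dict.getD_insert]
      by_cases hq : q = p.2
      · rw [if_pos hq]
        rw [hq] at ihD ihC ⊢
        have hfil : (xs ++ [p]).filter (fun x => x.2 == p.2) =
            xs.filter (fun x => x.2 == p.2) ++ [p] := by
          rw [List.filter_append]; simp
        by_cases hc : (xs.foldl pvStepA PySem.Dict.empty).contains p.2 = true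
        · rw [if_pos hc]
          rw [hc, eq_comm, List.any_eq_true] at ihC
          obtain ⟨x, hx, hbx⟩ := ihC
          have hxf : x ∈ xs.filter (fun x => x.2 == p.2) := List.mem_filter.mpr ⟨hx, hbx⟩
          unfold pvSpecA
          rw [hfil]
          rcases h : xs.filter (fun x => x.2 == p.2) with _ | ⟨a, l⟩
          · rw [h] at hxf; simp at hxf
          · rw [h, if_neg (by simp)]
        · rw [if_neg hc]
          have hnil : xs.filter (fun x => x.2 == p.2) = [] := by
            rcases h : xs.filter (fun x => x.2 == p.2) with _ | ⟨a, l⟩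
            · exact h
            · exfalso
              have ha : a ∈ xs.filter (fun x => x.2 == p.2) := by rw [h]; simp
              have := List.mem_filter.mp ha
              exact hc (by rw [ihC, List.any_eq_true]; exact ⟨a, this.1, this.2⟩)
          unfold pvSpecA
          rw [hfil, hnil]
          simp
      · have hne : ¬ ((p.2 == q) = true) := by simpa using fun h => hq h.symm
        have hfil : (xs ++ [p]).filter (fun x => x.2 == q) =
            xs.filter (fun x => x.2 == q) := by
          rw [List.filter_append]; simp [hne]
        rw [if_neg hq, ihD]
        unfold pvSpecA
        rw [hfil]
    · rw [PySem.Dict.contains_insert, ihC]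
      have hqs : (q == p.2) = (p.2 == q) := by
        simp only [Bool.beq_comm]
      rw [hqs, Bool.or_comm, List.any_append, List.any_cons, List.any_nil, Bool.or_false]

-- A's memo lookup, written through pvSigA
lemma pvAvalue (N K : Int) (cards : List (List Int)) (q : List Char) :
    (List.foldl
      (fun (memo : PySem.Dict (List Char) Int) num =>
        if memo.contains (pvSigA N K cards num) then memo.insert (pvSigA N K cards num) 0
        else memo.insert (pvSigA N K cards num) num)
      PySem.Dict.empty (PySem.List.pyRange 1 (N + 1) 1)).getD q 0 =
    pvSpecA ((PySem.List.pyRange 1 (N + 1) 1).map (fun n => (n, pvSigA N K cards n))) q := by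
  rw [PySem.List.foldl_congr_mem _ _
      (fun (memo : PySem.Dict (List Char) Int) num => pvStepA memo (num, pvSigA N K cards num)) _
      (by intro acc x _; rfl)]
  rw [show List.foldl
      (fun (memo : PySem.Dict (List Char) Int) num => pvStepA memo (num, pvSigA N K cards num))
      PySem.Dict.empty (PySem.List.pyRange 1 (N + 1) 1) =
      List.foldl pvStepA PySem.Dict.empty
        ((PySem.List.pyRange 1 (N + 1) 1).map (fun n => (n, pvSigA N K cards n))) from
    by rw [List.foldl_map]]
  exact (pvMemoA q _).1

-- pvSpecA over signature pairs is a candidate filter over the numbers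
lemma pvSpecA_filter (R : List Int) (sig : Int → List Char) (q : List Char) :
    pvSpecA (R.map fun n => (n, sig n)) q =
      if (R.filter (fun n => sig n == q)).length = 1
      then (R.filter (fun n => sig n == q)).headD 0 else 0 := by
  have hfm : (R.map fun n => (n, sig n)).filter (fun p => p.2 == q) =
      (R.filter (fun n => sig n == q)).map (fun n => (n, sig n)) := by
    rw [List.filter_map]; rfl
  unfold pvSpecA
  rw [hfm, List.length_map]
  rcases h : R.filter (fun n => sig n == q) with _ | ⟨a, l⟩ <;> simp

-- a chain of filters is one filter by the conjunction
lemma pvFoldlFilter {α β : Type} (f : β → α → Bool) (ps : List β) :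
    ∀ (l : List α), ps.foldl (fun l p => l.filter (f p)) l =
      l.filter (fun x => ps.all (fun p => f p x)) := by
  induction ps with
  | nil => intro l; simp
  | cons hd tl ih =>
    intro l
    simp only [List.foldl_cons, ih, List.filter_filter, List.all_cons]
    apply List.filter_congr
    intro x _
    rw [Bool.and_comm]

-- all over enumerate, index form
lemma pvAllEnum (q : List Char) (f : Int → Char → Bool) :
    (PySem.List.enumerate q 0).all (fun p => f p.1 p.2) = true ↔
      ∀ j : Nat, (hj : j < q.length) → f ((0 : Int) + j) q[j] = true := by
  rw [List.all_eq_true]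
  constructor
  · intro h j hj
    exact h ((0 : Int) + j, q[j]) ((PySem.List.mem_enumerate_iff _ _ _).mpr ⟨j, hj, rfl⟩)
  · rintro h p hp
    obtain ⟨j, hj, rfl⟩ := (PySem.List.mem_enumerate_iff _ _ _).mp hp
    exact h j hj

lemma pvSigP_len (K : Int) (cards : List (List Int)) (n : Int) :
    (pvSigP K cards n).length = K.toNat := by
  simp [pvSigP]

lemma pvSigP_eq_iff (K : Int) (cards : List (List Int)) (n : Int) (q : List Char)
    (hlen : q.length = K.toNat) :
    pvSigP K cards n = q ↔
      ∀ j : Nat, (hj : j < q.length) →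
        (if n ∈ cards.getD j [] then 'Y' else 'N') = q[j] := by
  constructor
  · intro h j hj
    have hj' : j < (pvSigP K cards n).length := by rw [pvSigP_len]; omega
    have := List.getElem_of_eq h hj'
    rw [← this]
    simp [pvSigP]
  · intro h
    apply List.ext_getElem (by rw [pvSigP_len, hlen])
    intro j h1 h2
    have := h j h2
    simpa [pvSigP] using this

lemma pvCharStep (m : Prop) [Decidable m] (ch : Char) (hch : ch = 'Y' ∨ ch = 'N') :
    ((if m then 'Y' else 'N') = ch) ↔ (decide m == (ch == 'Y')) = true := by
  rcases hch with rfl | rfl <;> by_cases hm : m <;> simp [hm]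

-- A's signature equals the pure signature, for rows actually in the matrix (main branch: card numbers in [0, N])
lemma pvSigA_eq_sigP (N K : Int) (cards : List (List Int))
    (hP1 : ∀ card ∈ cards, ∀ num ∈ card, 0 ≤ num ∧ num ≤ N)
    (hP2 : ∀ card ∈ cards.drop K.toNat, card = [])
    (n : Int) (h0 : 0 ≤ n) (h1 : n ≤ N) :
    pvSigA N K cards n = pvSigP K cards n := by
  have hm0W : ∀ row ∈ List.replicate (N + 1).toNat (List.replicate K.toNat 'N'),
      row.length = K.toNat := by
    intro row hr
    rw [List.eq_of_mem_replicate hr, List.length_replicate]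
  have hnum : ∀ card ∈ cards, ∀ num ∈ card, 0 ≤ num ∧
      num < ((List.replicate (N + 1).toNat (List.replicate K.toNat 'N')).length : Int) := by
    intro card hc x hx
    obtain ⟨a, b⟩ := hP1 card hc x hx
    rw [List.length_replicate]
    omega
  have hcol : ∀ p ∈ PySem.List.enumerate cards 0, p.2 ≠ [] →
      0 ≤ p.1 ∧ p.1 < ((K.toNat : Nat) : Int) := by
    intro p hp hne
    obtain ⟨k, hk, rfl⟩ := (PySem.List.mem_enumerate_iff _ _ _).mp hp
    constructor
    · show (0 : Int) ≤ 0 + (k : Int); omega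
    · show (0 : Int) + (k : Int) < ((K.toNat : Nat) : Int)
      by_contra hcon
      have hkK : K.toNat ≤ k := by omega
      have hmemd : cards[k] ∈ cards.drop K.toNat := by
        rw [List.mem_iff_getElem]
        refine ⟨k - K.toNat, by rw [List.length_drop]; omega, ?_⟩
        rw [List.getElem_drop]
        have h2 : K.toNat + (k - K.toNat) = k := by omega
        simp only [h2]
      exact hne (hP2 _ hmemd)
  obtain ⟨hlen, hWc, hEc⟩ := pvOuterFold cards 0
    (List.replicate (N + 1).toNat (List.replicate K.toNat 'N')) K.toNat hm0W hnum hcol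
  have hmatlen : (pvMat N K cards).length = (N + 1).toNat := by
    unfold pvMat; rw [hlen, List.length_replicate]
  have hE : ∀ r j : Nat, pvE (pvMat N K cards) r j =
      if ∃ kk : Nat, ∃ _ : kk < cards.length, (r : Int) ∈ cards[kk] ∧ j = kk then 'Y'
      else 'N' := by
    intro r j
    have hm0E : pvE (List.replicate (N + 1).toNat (List.replicate K.toNat 'N')) r j = 'N' := by
      unfold pvE
      by_cases hr : r < (N + 1).toNat <;> by_cases hj : j < K.toNat <;>
        simp [List.getD_eq_getElem?_getD, hr, hj]
    have := hEc r j
    unfold pvMat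
    rw [this, hm0E]
    by_cases h : ∃ p ∈ PySem.List.enumerate cards 0, (r : Int) ∈ p.2 ∧ j = p.1.toNat
    · rw [if_pos h, if_pos ?_]
      obtain ⟨p, hp, hm, hj⟩ := h
      obtain ⟨k, hk, rfl⟩ := (PySem.List.mem_enumerate_iff _ _ _).mp hp
      refine ⟨k, hk, hm, ?_⟩
      rw [hj]
      show ((0 : Int) + (k : Int)).toNat = k
      omega
    · rw [if_neg h, if_neg ?_]
      rintro ⟨kk, hkk, hm, rfl⟩
      refine h ⟨((0 : Int) + (j : Int), cards[j]), ?_, hm, by omega⟩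
      rw [PySem.List.mem_enumerate_iff]
      exact ⟨j, hkk, rfl⟩
  -- elementwise comparison of the two signatures
  have hrow : PySem.List.pyGetD (pvMat N K cards) n [] = (pvMat N K cards).getD n.toNat [] := by
    rw [PySem.List.pyGetD_eq_getElem _ [] h0 (by rw [hmatlen]; omega),
        List.getD_eq_getElem _ [] (by rw [hmatlen]; omega)]
  unfold pvSigA pvSigP
  rw [PySem.List.pyRange_one, List.map_map]
  apply List.ext_getElem (by simp)
  intro j h1' h2'
  have hjK : j < K.toNat := by simpa using h2'
  rw [List.getElem_map, List.getElem_map, List.getElem_range, List.getElem_range]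
  simp only [Function.comp_apply]
  have hidx : ((0 : Int) + (j : Int)) = ((j : Nat) : Int) := by omega
  rw [hidx, hrow, PySem.List.pyGetD_natCast]
  have hEk : ((pvMat N K cards).getD n.toNat []).getD j 'N' = pvE (pvMat N K cards) n.toNat j := rfl
  rw [hEk, hE n.toNat j]
  have hnn : ((n.toNat : Nat) : Int) = n := by omega
  by_cases hj : j < cards.length
  · have hgd : cards.getD j [] = cards[j] := List.getD_eq_getElem cards [] hj
    by_cases hmem : n ∈ cards[j]
    · rw [if_pos ⟨j, hj, by rw [hnn]; exact ⟨hmem, rfl⟩⟩, hgd, if_pos hmem]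
    · rw [if_neg ?_, hgd, if_neg hmem]
      rintro ⟨kk, hkk, hmem', rfl⟩
      rw [hnn] at hmem'
      exact hmem hmem'
  · have hgd : cards.getD j [] = [] := List.getD_eq_default cards [] (by omega)
    have hno : ¬ ∃ kk : Nat, ∃ _ : kk < cards.length, ((n.toNat : Nat) : Int) ∈ cards[kk] ∧ j = kk := by
      rintro ⟨kk, hkk, _, rfl⟩
      omega
    rw [hgd, if_neg hno]
    simp

-- B's per-position test, as a membership proposition
lemma pvMembers (cards : List (List Int)) (j : Nat) (n : Int) :
    (PySem.Set.contains
      (if ((0 : Int) + (j : Int)) < (cards.length : Int)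
       then PySem.Set.ofList (PySem.List.pyGetD cards ((0 : Int) + (j : Int)) [])
       else []) n) = decide (n ∈ cards.getD j []) := by
  by_cases hj : j < cards.length
  · rw [if_pos (by omega)]
    have hidx : ((0 : Int) + (j : Int)) = ((j : Nat) : Int) := by omega
    rw [hidx, PySem.List.pyGetD_natCast]
    by_cases hm : n ∈ cards.getD j []
    · rw [decide_eq_true hm]
      exact (PySem.Set.contains_iff _ _).mpr ((PySem.Set.mem_ofList _ _).mpr hm)
    · rw [decide_eq_false hm, ← Bool.not_eq_true]
      intro hc
      exact hm ((PySem.Set.mem_ofList _ _).mp ((PySem.Set.contains_iff _ _).mp hc))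
  · rw [if_neg (by omega), List.getD_eq_default cards [] (by omega)]
    simp [PySem.Set.contains]

-- the main branch: every card number in [0, N]; queries of any shape
lemma pvMain (N K : Int) (cards : List (List Int)) (q : String)
    (hP1 : ∀ card ∈ cards, ∀ num ∈ card, 0 ≤ num ∧ num ≤ N)
    (hP2 : ∀ card ∈ cards.drop K.toNat, card = [])
    (hlen : PySem.Str.len q = K) :
    pvSpecA ((PySem.List.pyRange 1 (N + 1) 1).map (fun n => (n, pvSigA N K cards n))) q.toList =
      pvOwner N K cards q := by
  have hlenN : q.toList.length = K.toNat := by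
    rw [PySem.Str.len_eq] at hlen; omega
  have hsig : ∀ n ∈ PySem.List.pyRange 1 (N + 1) 1,
      pvSigA N K cards n = pvSigP K cards n := by
    intro n hn
    rw [PySem.List.mem_pyRange_one] at hn
    exact pvSigA_eq_sigP N K cards hP1 hP2 n (by omega) (by omega)
  have hfilA : (PySem.List.pyRange 1 (N + 1) 1).filter (fun n => pvSigA N K cards n == q.toList) =
      (PySem.List.pyRange 1 (N + 1) 1).filter (fun n => pvSigP K cards n == q.toList) :=
    List.filter_congr (by intro n hn; rw [hsig n hn])
  rw [pvSpecA_filter, hfilA]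
  by_cases hbad : q.toList.any (fun ch => !(ch == 'Y' || ch == 'N')) = true
  · -- a character outside 'YN': no signature can match, both sides are 0
    have hguard : ((PySem.Str.len q != K) || q.toList.any (fun ch => !(ch == 'Y' || ch == 'N'))) = true := by
      rw [hbad, Bool.or_true]
    obtain ⟨ch, hchmem, hch⟩ := List.any_eq_true.mp hbad
    have hfil0 : (PySem.List.pyRange 1 (N + 1) 1).filter
        (fun n => pvSigP K cards n == q.toList) = [] := by
      rw [List.filter_eq_nil_iff]
      intro n _
      simp only [beq_iff_eq]
      intro hc
      have : ch ∈ pvSigP K cards n := by rw [hc]; exact hchmem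
      obtain ⟨j, _, hj⟩ := List.mem_map.mp this
      revert hch
      split at hj <;> simp [← hj]
    have hB : pvOwner N K cards q = 0 := by
      unfold pvOwner
      simp only [hguard, if_true]
    rw [hB, hfil0]
    simp
  · have hguard : ((PySem.Str.len q != K) || q.toList.any (fun ch => !(ch == 'Y' || ch == 'N'))) = false := by
      rw [Bool.eq_false_iff.mpr hbad, Bool.or_false, bne_eq_false_iff_eq]
      exact hlen
    have hYN : ∀ ch ∈ q.toList, ch = 'Y' ∨ ch = 'N' := by
      intro ch hch
      by_contra hc
      push_neg at hc
      exact hbad (List.any_eq_true.mpr ⟨ch, hch, by simp [hc.1, hc.2]⟩)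
    have hB : pvOwner N K cards q =
        (if ((PySem.List.enumerate q.toList 0).foldl
            (fun (cands : List Int) p =>
              cands.filter (fun x => PySem.Set.contains
                (if p.1 < (cards.length : Int)
                 then PySem.Set.ofList (PySem.List.pyGetD cards p.1 []) else []) x == (p.2 == 'Y')))
            (PySem.List.pyRange 1 (N + 1) 1)).length = 1
         then ((PySem.List.enumerate q.toList 0).foldl
            (fun (cands : List Int) p =>
              cands.filter (fun x => PySem.Set.contains
                (if p.1 < (cards.length : Int)
                 then PySem.Set.ofList (PySem.List.pyGetD cards p.1 []) else []) x == (p.2 == 'Y')))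
            (PySem.List.pyRange 1 (N + 1) 1)).headD 0
         else 0) := by
      unfold pvOwner
      simp only [hguard, Bool.false_eq_true, if_false]
    rw [hB]
    rw [pvFoldlFilter
        (fun (p : Int × Char) x => PySem.Set.contains
          (if p.1 < (cards.length : Int)
           then PySem.Set.ofList (PySem.List.pyGetD cards p.1 []) else []) x == (p.2 == 'Y'))
        (PySem.List.enumerate q.toList 0)]
    have hfilB : (PySem.List.pyRange 1 (N + 1) 1).filter
        (fun x => (PySem.List.enumerate q.toList 0).all
          (fun p => PySem.Set.contains
            (if p.1 < (cards.length : Int)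
             then PySem.Set.ofList (PySem.List.pyGetD cards p.1 []) else []) x == (p.2 == 'Y'))) =
        (PySem.List.pyRange 1 (N + 1) 1).filter (fun n => pvSigP K cards n == q.toList) := by
      apply List.filter_congr
      intro n _
      rw [Bool.eq_iff_iff]
      rw [pvAllEnum q.toList (fun i ch => PySem.Set.contains
          (if i < (cards.length : Int)
           then PySem.Set.ofList (PySem.List.pyGetD cards i []) else []) n == (ch == 'Y'))]
      rw [beq_iff_eq, pvSigP_eq_iff K cards n q.toList hlenN]
      constructor
      · intro h j hj
        have := h j hj
        rw [pvMembers cards j n] at this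
        rw [pvCharStep _ _ (hYN _ (List.getElem_mem hj))]
        exact this
      · intro h j hj
        rw [pvMembers cards j n]
        have := h j hj
        rw [pvCharStep _ _ (hYN _ (List.getElem_mem hj))] at this
        exact this
    rw [hfilB]

-- N ≤ 0: A's memo is empty and B's candidate range is empty — every answer is 0
lemma pvZero (N K : Int) (cards : List (List Int)) (q : String) (hN : N ≤ 0) :
    pvSpecA ((PySem.List.pyRange 1 (N + 1) 1).map (fun n => (n, pvSigA N K cards n))) q.toList =
      pvOwner N K cards q := by
  have hnil : PySem.List.pyRange 1 (N + 1) 1 = [] := PySem.List.pyRange_one_eq_nil (by omega)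
  rw [hnil]
  unfold pvOwner
  simp only [hnil]
  rw [pvFoldlFilter]
  split <;> simp [pvSpecA]

-- a query of the wrong length matches no signature — both answers are 0
lemma pvLen (N K : Int) (cards : List (List Int)) (q : String) (hK : 0 ≤ K)
    (hq : PySem.Str.len q ≠ K) :
    pvSpecA ((PySem.List.pyRange 1 (N + 1) 1).map (fun n => (n, pvSigA N K cards n))) q.toList =
      pvOwner N K cards q := by
  have hlq : q.toList.length ≠ K.toNat := by
    rw [PySem.Str.len_eq] at hq; omega
  have hsa : ∀ n : Int, (pvSigA N K cards n).length = K.toNat := by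
    intro n
    unfold pvSigA
    rw [List.length_map, PySem.List.length_pyRange_one]
    omega
  rw [pvSpecA_filter]
  have hfil0 : (PySem.List.pyRange 1 (N + 1) 1).filter
      (fun n => pvSigA N K cards n == q.toList) = [] := by
    rw [List.filter_eq_nil_iff]
    intro n _
    simp only [beq_iff_eq]
    intro hc
    exact hlq (by rw [← hc, hsa n])
  rw [hfil0]
  have hguard : ((PySem.Str.len q != K) || q.toList.any (fun ch => !(ch == 'Y' || ch == 'N'))) = true := by
    have h1 : (PySem.Str.len q != K) = true := by simpa using hq
    rw [h1, Bool.true_or]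
  have hB : pvOwner N K cards q = 0 := by
    unfold pvOwner
    simp only [hguard, if_true]
  rw [hB]
  simp

-- ===== VERDICT (by name: the statement is the Claim_ definition above) =====
theorem solution_spec : Claim_equal_solution := by
  unfold Claim_equal_solution
  intro N K M F cards queries _ hPre
  obtain ⟨⟨hK, hA1, hA2⟩, hdisj⟩ := hPre
  simp only [Spec_solution, solution, solution_alt]
  apply List.map_congr_left
  intro q hq
  show (List.foldl
      (fun (memo : PySem.Dict (List Char) Int) num =>
        if memo.contains (pvSigA N K cards num) then memo.insert (pvSigA N K cards num) 0
        else memo.insert (pvSigA N K cards num) num)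
      PySem.Dict.empty (PySem.List.pyRange 1 (N + 1) 1)).getD q.toList 0 = pvOwner N K cards q
  rw [pvAvalue N K cards q.toList]
  by_cases hlen : PySem.Str.len q = K
  · rcases hdisj with hN | hnn | hql
    · exact pvZero N K cards q hN
    · exact pvMain N K cards q (fun c hc n hn => ⟨hnn c hc n hn, (hA1 c hc n hn).2⟩) hA2 hlen
    · exact absurd hlen (hql q hq)
  · exact pvLen N K cards q hK hlen
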